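-- pv_equiv track=rewrite | github.com/TheAnsarya/GameInfo | tools/assembly/macro_processor.py | _parse_macro_args
-- ===== SOURCE A (Python) =====
-- from typing import Any, Callable, Dict, List, Optional, Set, Tuple, Union
--
-- def _parse_macro_args(arg_string: str) -> List[str]:
-- 	"""Parse macro arguments, handling quoted strings and nested parens."""
-- 	args = []
-- 	current = ""
-- 	in_string = False
-- 	string_char = None
-- 	paren_depth = 0
--
-- 	for char in arg_string:
-- 		if in_string:
-- 			current += char
-- 			if char == string_char:
-- 				in_string = False
-- 		elif char in ('"', "'"):
-- 			in_string = True
-- 			string_char = char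
-- 			current += char
-- 		elif char == '(':
-- 			paren_depth += 1
-- 			current += char
-- 		elif char == ')':
-- 			paren_depth -= 1
-- 			current += char
-- 		elif char == ',' and paren_depth == 0:
-- 			args.append(current.strip())
-- 			current = ""
-- 		else:
-- 			current += char
--
-- 	if current.strip():
-- 		args.append(current.strip())
--
-- 	return args
-- ===== SOURCE B (Python) =====
-- from typing import List, Optional, Tuple
--
--
-- def _next_segment(s: str, depth: int = 0) -> Tuple[str, Optional[str]]:
-- 	"""Scan for the next top-level comma; return (raw segment, remainder after
-- 	the comma) or (whole string, None) if no top-level comma exists."""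
-- 	i = 0
-- 	n = len(s)
-- 	while i < n:
-- 		c = s[i]
-- 		if c in ('"', "'"):
-- 			i += 1
-- 			while i < n and s[i] != c:
-- 				i += 1
-- 			if i < n:
-- 				i += 1  # skip the closing quote
-- 			continue
-- 		if c == '(':
-- 			depth += 1
-- 		elif c == ')':
-- 			depth -= 1
-- 		elif c == ',' and depth == 0:
-- 			return s[:i], s[i + 1:]
-- 		i += 1
-- 	return s, None
--
--
-- def _parse_macro_args(arg_string: str) -> List[str]:
-- 	segments = []
-- 	rest: Optional[str] = arg_string
-- 	while rest is not None:
-- 		seg, rest = _next_segment(rest)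
-- 		segments.append(seg)
-- 	out = [s.strip() for s in segments[:-1]]
-- 	last = segments[-1].strip()
-- 	if last:
-- 		out.append(last)
-- 	return out
-- ===== Notes on version B (the rewrite author's own statement) =====
-- stated objective: alternative
-- what changed: A is a single character-by-character fold carrying (args, current, in_string, string_char, paren_depth) state; B decomposes into a _next_segment scanner that slices at the next top-level comma (with an inner quote-skipping loop), an outer loop collecting raw segments, and a final strip/drop-trailing-empty pass.
import Mathlib
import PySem

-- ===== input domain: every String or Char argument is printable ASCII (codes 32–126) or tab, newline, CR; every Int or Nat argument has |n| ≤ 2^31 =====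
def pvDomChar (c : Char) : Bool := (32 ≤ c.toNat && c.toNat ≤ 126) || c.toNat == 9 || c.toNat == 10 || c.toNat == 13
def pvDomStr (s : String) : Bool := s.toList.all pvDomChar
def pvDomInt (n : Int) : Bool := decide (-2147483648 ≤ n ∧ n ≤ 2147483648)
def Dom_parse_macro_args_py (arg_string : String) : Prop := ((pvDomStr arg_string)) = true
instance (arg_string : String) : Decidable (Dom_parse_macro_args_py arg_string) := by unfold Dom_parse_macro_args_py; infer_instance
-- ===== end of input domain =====

-- B replaces A's single character-fold with mutable accumulator state by a two-level
-- decomposition: a scanner that cuts the string at the next top-level comma (skipping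
-- quoted runs with an inner loop), iterated to collect raw segments, then a strip/filter
-- pass over the segments (objective: alternative decomposition, same cost).

-- ===== PORT A =====
-- A's for-loop over the characters, state = (args, current, in_string, string_char, paren_depth)
def pmaLoopA : List Char → List String → List Char → Bool → Option Char → Int → List String
  | [], args, cur, _inStr, _sc, _d =>
      if PySem.Str.strip (String.ofList cur) ≠ "" then args ++ [PySem.Str.strip (String.ofList cur)]
      else args
  | c :: rest, args, cur, inStr, sc, depth =>
      if inStr then
        if some c = sc then pmaLoopA rest args (cur ++ [c]) false sc depth
        else pmaLoopA rest args (cur ++ [c]) true sc depth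
      else if c = '"' ∨ c = '\'' then pmaLoopA rest args (cur ++ [c]) true (some c) depth
      else if c = '(' then pmaLoopA rest args (cur ++ [c]) inStr sc (depth + 1)
      else if c = ')' then pmaLoopA rest args (cur ++ [c]) inStr sc (depth - 1)
      else if c = ',' ∧ depth = 0 then
        pmaLoopA rest (args ++ [PySem.Str.strip (String.ofList cur)]) [] inStr sc depth
      else pmaLoopA rest args (cur ++ [c]) inStr sc depth

def parse_macro_args_py (arg_string : String) : List String :=
  pmaLoopA arg_string.toList [] [] false none 0

-- ===== PORT B =====
-- Source B's inner while-loop: consume characters until the matching quote char (inclusive);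
-- returns (consumed run, remainder)
def pmaSkipQuote (q : Char) : List Char → List Char × List Char
  | [] => ([], [])
  | c :: rest =>
      if c = q then ([c], rest)
      else
        let p := pmaSkipQuote q rest
        (c :: p.1, p.2)

-- Source B's _next_segment scan loop (fuel only bounds the recursion; it is never
-- exhausted when fuel ≥ length of the input)
def pmaNextSegGo : Nat → List Char → Int → List Char × Option (List Char)
  | 0, _, _ => ([], none)
  | _ + 1, [], _ => ([], none)
  | fuel + 1, c :: rest, depth =>
      if c = '"' ∨ c = '\'' then
        let p := pmaSkipQuote c rest
        let q := pmaNextSegGo fuel p.2 depth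
        (c :: (p.1 ++ q.1), q.2)
      else if c = '(' then
        let q := pmaNextSegGo fuel rest (depth + 1)
        (c :: q.1, q.2)
      else if c = ')' then
        let q := pmaNextSegGo fuel rest (depth - 1)
        (c :: q.1, q.2)
      else if c = ',' ∧ depth = 0 then ([], some rest)
      else
        let q := pmaNextSegGo fuel rest depth
        (c :: q.1, q.2)

-- Source B's _next_segment: scan to the next comma at paren depth 0, skipping quoted runs;
-- returns (raw segment = chars before the comma, some remainder) or (whole string, none)
def pmaNextSeg (cs : List Char) (depth : Int) : List Char × Option (List Char) :=
  pmaNextSegGo cs.length cs depth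

-- Source B's outer while-loop: collect the raw segments of the whole string
-- (fuel again only bounds the recursion; each remainder is strictly shorter)
def pmaSegsGo : Nat → List Char → List (List Char)
  | 0, _ => []
  | fuel + 1, cs =>
      match (pmaNextSeg cs 0).2 with
      | none => [(pmaNextSeg cs 0).1]
      | some rest => (pmaNextSeg cs 0).1 :: pmaSegsGo fuel rest

def pmaSegs (cs : List Char) : List (List Char) :=
  pmaSegsGo (cs.length + 1) cs

-- Source B's final pass: strip every interior segment, keep the last only if nonempty after strip
def pmaFinish : List (List Char) → List String
  | [] => []
  | [seg] =>
      if PySem.Str.strip (String.ofList seg) ≠ "" then [PySem.Str.strip (String.ofList seg)] else []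
  | seg :: rest => PySem.Str.strip (String.ofList seg) :: pmaFinish rest

def parse_macro_args_py_alt (arg_string : String) : List String :=
  pmaFinish (pmaSegs arg_string.toList)

-- ===== PRECONDITION & SPEC =====
def Spec_parse_macro_args_py (arg_string : String) (out : List String) : Prop := out = parse_macro_args_py_alt arg_string
instance (arg_string : String) (out : List String) : Decidable (Spec_parse_macro_args_py arg_string out) := by unfold Spec_parse_macro_args_py; infer_instance

-- ===== CLAIM (what is proved, stated in full; the proofs are below) =====
def Claim_equal_parse_macro_args_py : Prop := ∀ (arg_string : String), Dom_parse_macro_args_py arg_string → Spec_parse_macro_args_py arg_string (parse_macro_args_py arg_string)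

-- ===== LEMMAS AND PROOFS =====

theorem pmaSkipQuote_len (q : Char) (cs : List Char) :
    (pmaSkipQuote q cs).2.length ≤ cs.length := by
  induction cs with
  | nil => simp [pmaSkipQuote]
  | cons c rest ih =>
    simp only [pmaSkipQuote]
    split
    · simp
    · simpa using Nat.le_succ_of_le ih

theorem pmaNextSegGo_len (f : Nat) : ∀ (cs : List Char) (d : Int) (rest : List Char),
    (pmaNextSegGo f cs d).2 = some rest → rest.length < cs.length := by
  induction f with
  | zero => intro cs d rest h; simp [pmaNextSegGo] at h
  | succ f ih =>
    intro cs d rest h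
    cases cs with
    | nil => simp [pmaNextSegGo] at h
    | cons c cs' =>
      simp only [pmaNextSegGo] at h
      split at h
      · have := ih _ _ _ h
        have h2 := pmaSkipQuote_len c cs'
        simp only [List.length_cons]; omega
      · split at h
        · have := ih _ _ _ h
          simp only [List.length_cons]; omega
        · split at h
          · have := ih _ _ _ h
            simp only [List.length_cons]; omega
          · split at h
            · cases h; simp
            · have := ih _ _ _ h
              simp only [List.length_cons]; omega

theorem pmaNextSeg_rest_len (cs : List Char) (depth : Int) (rest : List Char)
    (h : (pmaNextSeg cs depth).2 = some rest) : rest.length < cs.length :=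
  pmaNextSegGo_len cs.length cs depth rest h

-- the segment collector's fuel is irrelevant once it exceeds the input's length
theorem pmaSegsGo_fuel (f : Nat) : ∀ (g : Nat) (cs : List Char),
    cs.length < f → cs.length < g → pmaSegsGo f cs = pmaSegsGo g cs := by
  induction f with
  | zero => intro g cs hf _; omega
  | succ f ih =>
    intro g cs hf hg
    cases g with
    | zero => omega
    | succ g =>
      cases h : (pmaNextSeg cs 0).2 with
      | none => simp [pmaSegsGo, h]
      | some rest =>
        have hlt := pmaNextSeg_rest_len cs 0 rest h
        simp only [pmaSegsGo, h]
        rw [ih g rest (by omega) (by omega)]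

theorem pmaSegs_none (cs : List Char) (h : (pmaNextSeg cs 0).2 = none) :
    pmaSegs cs = [(pmaNextSeg cs 0).1] := by
  unfold pmaSegs
  simp [pmaSegsGo, h]

theorem pmaSegs_some (cs rest : List Char) (h : (pmaNextSeg cs 0).2 = some rest) :
    pmaSegs cs = (pmaNextSeg cs 0).1 :: pmaSegs rest := by
  have hlt := pmaNextSeg_rest_len cs 0 rest h
  conv_lhs => unfold pmaSegs
  simp only [pmaSegsGo, h]
  unfold pmaSegs
  rw [pmaSegsGo_fuel cs.length (rest.length + 1) rest (by omega) (by omega)]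

theorem pmaSegs_ne_nil (cs : List Char) : pmaSegs cs ≠ [] := by
  unfold pmaSegs
  simp only [pmaSegsGo]
  cases h : (pmaNextSeg cs 0).2 <;> simp

-- When not inside a string, A's loop never reads string_char, so its value is irrelevant
theorem loopA_sc (cs : List Char) : ∀ (args : List String) (cur : List Char)
    (sc sc' : Option Char) (depth : Int),
    pmaLoopA cs args cur false sc depth = pmaLoopA cs args cur false sc' depth := by
  induction cs with
  | nil => intro args cur sc sc' depth; simp [pmaLoopA]
  | cons c rest ih =>
    intro args cur sc sc' depth
    simp only [pmaLoopA, Bool.false_eq_true, if_false]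
    split
    · rfl
    · split
      · exact ih ..
      · split
        · exact ih ..
        · split
          · exact ih ..
          · exact ih ..

-- A's in-string run equals B's quote-skipping scan
theorem loopA_quote (cs : List Char) (q : Char) : ∀ (args : List String) (cur : List Char)
    (depth : Int),
    pmaLoopA cs args cur true (some q) depth =
      pmaLoopA (pmaSkipQuote q cs).2 args (cur ++ (pmaSkipQuote q cs).1) false (some q) depth := by
  induction cs with
  | nil => intro args cur depth; simp [pmaSkipQuote, pmaLoopA]
  | cons c rest ih =>
    intro args cur depth
    by_cases h : c = q
    · subst h
      simp [pmaSkipQuote, pmaLoopA]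
    · have h' : ¬ (some c = some q) := by simpa using h
      simp only [pmaSkipQuote, if_neg h, pmaLoopA, if_neg h', if_true]
      rw [ih]
      simp

-- One pass of A's loop from a segment boundary equals one call of B's _next_segment
theorem loopA_segGo (f : Nat) : ∀ (cs : List Char) (depth : Int), cs.length ≤ f →
    ∀ (args : List String) (cur : List Char),
    pmaLoopA cs args cur false none depth =
      (match (pmaNextSegGo f cs depth).2 with
       | none =>
           if PySem.Str.strip (String.ofList (cur ++ (pmaNextSegGo f cs depth).1)) ≠ "" then
             args ++ [PySem.Str.strip (String.ofList (cur ++ (pmaNextSegGo f cs depth).1))]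
           else args
       | some rest =>
           pmaLoopA rest (args ++ [PySem.Str.strip (String.ofList (cur ++ (pmaNextSegGo f cs depth).1))])
             [] false none 0) := by
  induction f with
  | zero =>
    intro cs depth hf args cur
    have : cs = [] := by cases cs <;> simp_all
    subst this
    simp [pmaNextSegGo, pmaLoopA]
  | succ f ih =>
    intro cs depth hf args cur
    cases cs with
    | nil => simp [pmaNextSegGo, pmaLoopA]
    | cons c rest =>
      simp only [List.length_cons, Nat.succ_le_succ_iff] at hf
      by_cases hq : c = '"' ∨ c = '\''
      · simp only [pmaLoopA, Bool.false_eq_true, if_false, if_pos hq]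
        rw [loopA_quote, loopA_sc _ _ _ (some c) none,
          ih _ depth (le_trans (pmaSkipQuote_len c rest) hf)]
        simp only [pmaNextSegGo, if_pos hq]
        cases h : (pmaNextSegGo f (pmaSkipQuote c rest).2 depth).2 <;>
          simp [List.append_assoc]
      · by_cases hp : c = '('
        · simp only [pmaLoopA, Bool.false_eq_true, if_false, if_neg hq, if_pos hp]
          rw [ih rest (depth + 1) hf]
          simp only [pmaNextSegGo, if_neg hq, if_pos hp]
          cases h : (pmaNextSegGo f rest (depth + 1)).2 <;> simp [List.append_assoc]
        · by_cases hp2 : c = ')'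
          · simp only [pmaLoopA, Bool.false_eq_true, if_false, if_neg hq, if_neg hp, if_pos hp2]
            rw [ih rest (depth - 1) hf]
            simp only [pmaNextSegGo, if_neg hq, if_neg hp, if_pos hp2]
            cases h : (pmaNextSegGo f rest (depth - 1)).2 <;> simp [List.append_assoc]
          · by_cases hc : c = ',' ∧ depth = 0
            · simp only [pmaLoopA, Bool.false_eq_true, if_false, if_neg hq, if_neg hp,
                if_neg hp2, if_pos hc]
              simp only [pmaNextSegGo, if_neg hq, if_neg hp, if_neg hp2, if_pos hc]
              simp [hc.2]
            · simp only [pmaLoopA, Bool.false_eq_true, if_false, if_neg hq, if_neg hp,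
                if_neg hp2, if_neg hc]
              rw [ih rest depth hf]
              simp only [pmaNextSegGo, if_neg hq, if_neg hp, if_neg hp2, if_neg hc]
              cases h : (pmaNextSegGo f rest depth).2 <;> simp [List.append_assoc]

theorem loopA_seg (cs : List Char) (depth : Int) (args : List String) (cur : List Char) :
    pmaLoopA cs args cur false none depth =
      (match (pmaNextSeg cs depth).2 with
       | none =>
           if PySem.Str.strip (String.ofList (cur ++ (pmaNextSeg cs depth).1)) ≠ "" then
             args ++ [PySem.Str.strip (String.ofList (cur ++ (pmaNextSeg cs depth).1))]
           else args
       | some rest =>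
           pmaLoopA rest (args ++ [PySem.Str.strip (String.ofList (cur ++ (pmaNextSeg cs depth).1))])
             [] false none 0) :=
  loopA_segGo cs.length cs depth le_rfl args cur

-- Iterating: A's whole loop equals B's segment list post-processed by pmaFinish
theorem loopA_segs : ∀ (n : Nat) (cs : List Char), cs.length = n → ∀ (args : List String),
    pmaLoopA cs args [] false none 0 = args ++ pmaFinish (pmaSegs cs) := by
  intro n
  induction n using Nat.strong_induction_on with
  | _ n ih =>
    intro cs hlen args
    rw [loopA_seg cs 0 args []]
    cases h : (pmaNextSeg cs 0).2 with
    | none =>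
      rw [pmaSegs_none cs h]
      simp only [pmaFinish, List.nil_append]
      split <;> simp
    | some rest =>
      have hlt : rest.length < cs.length := pmaNextSeg_rest_len cs 0 rest h
      simp only []
      rw [ih rest.length (by omega) rest rfl]
      rw [pmaSegs_some cs rest h]
      have hne := pmaSegs_ne_nil rest
      cases hsegs : pmaSegs rest with
      | nil => exact absurd hsegs hne
      | cons s0 srest =>
        simp [pmaFinish]

-- ===== VERDICT (by name: the statement is the Claim_ definition above) =====
theorem parse_macro_args_py_spec : Claim_equal_parse_macro_args_py := by
  intro s _
  unfold Spec_parse_macro_args_py parse_macro_args_py parse_macro_args_py_alt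
  rw [loopA_segs s.toList.length s.toList rfl []]
  simp
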